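-- pv_equiv track=rewrite | github.com/tamgdemaslo/loyalty-bot1 | ux_copy_texts.py | spending_recommendations
-- ===== SOURCE A (Python) =====
-- def fmt_money(amount: int) -> str:
--     """Форматирование суммы в удобочитаемый вид"""
--     if amount == 0:
--         return "0 ₽"
--     return f"{amount:,} ₽".replace(",", " ")
--
-- def spending_recommendations(balance: int) -> str:
--     """Рекомендации по тратам"""
--     recommendations = []
--
--     if balance >= 1000:
--         recommendations.append("🔧 Плановое ТО — экономия до 30%")
--     if balance >= 500:
--         recommendations.append("🛒 Покупка запчастей — экономия до 25%")
--     if balance >= 200: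
--         recommendations.append("🧼 Мойка автомобиля — полная оплата")
--     if balance >= 100:
--         recommendations.append("🔍 Компьютерная диагностика")
--
--     text = f"💡 Лучшие способы потратить {fmt_money(balance)}:\n\n"
--     text += "\n".join(f"• {rec}" for rec in recommendations)
--     text += "\n\n💬 Записаться на что-то из списка?"
--
--     return text
-- ===== SOURCE B (Python) =====
-- def fmt_money(amount: int) -> str:
--     """Форматирование суммы в удобочитаемый вид"""
--     if amount == 0:
--         return "0 ₽"
--     return f"{amount:,} ₽".replace(",", " ")
--
-- # Thresholds ascending; messages in the display order (highest tier first).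
-- # The recommendations are always a suffix of _MESSAGES: binary-search the
-- # number of thresholds met, then slice that suffix.
-- _THRESHOLDS = (100, 200, 500, 1000)
-- _MESSAGES = (
--     "🔧 Плановое ТО — экономия до 30%",
--     "🛒 Покупка запчастей — экономия до 25%",
--     "🧼 Мойка автомобиля — полная оплата",
--     "🔍 Компьютерная диагностика",
-- )
--
-- def spending_recommendations(balance: int) -> str:
--     """Рекомендации по тратам"""
--     lo, hi = 0, len(_THRESHOLDS)
--     while lo < hi:                      # lo ends as bisect_right(_THRESHOLDS, balance)
--         mid = (lo + hi) // 2
--         if _THRESHOLDS[mid] <= balance: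
--             lo = mid + 1
--         else:
--             hi = mid
--     lines = "\n".join("• " + m for m in _MESSAGES[len(_MESSAGES) - lo:])
--     return ("💡 Лучшие способы потратить " + fmt_money(balance) + ":\n\n"
--             + lines + "\n\n💬 Записаться на что-то из списка?")
-- ===== Notes on version B (the rewrite author's own statement) =====
-- stated objective: alternative
-- what changed: Exploits that the recommendations are always a suffix of the fixed message table: B binary-searches (hand-written bisect_right loop) the number of thresholds met in an ascending threshold tuple and slices that suffix, instead of A's four sequential if/append mutations of a list.
import Mathlib
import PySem

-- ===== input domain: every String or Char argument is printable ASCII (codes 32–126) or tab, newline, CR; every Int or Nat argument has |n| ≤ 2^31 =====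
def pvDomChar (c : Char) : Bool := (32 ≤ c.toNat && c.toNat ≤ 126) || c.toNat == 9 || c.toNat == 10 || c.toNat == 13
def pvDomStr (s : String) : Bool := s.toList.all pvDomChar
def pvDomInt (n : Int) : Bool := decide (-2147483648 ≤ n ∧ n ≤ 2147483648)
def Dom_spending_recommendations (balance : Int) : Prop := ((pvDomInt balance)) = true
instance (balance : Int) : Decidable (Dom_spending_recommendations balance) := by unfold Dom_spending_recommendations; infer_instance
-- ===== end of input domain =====

-- B replaces A's four if/append mutations by a hand-written binary search for the number of
-- thresholds met, then slices that suffix of the message table; objective: alternative.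
-- fmt_money is byte-identical in both sources (ported once, used by both ports).

-- ===== PORT A =====
-- hand port of f"{n:,}" comma grouping (no PySem primitive): insert ',' after every 3
-- digits counted from the right; exact for ints (sign untouched, groups of 3).
def pvGroup3 : List Char → Nat → List Char
  | [], _ => []
  | c :: r, k => if k = 3 then ',' :: c :: pvGroup3 r 1 else c :: pvGroup3 r (k + 1)

def fmt_money (amount : Int) : String :=
  if amount = 0 then "0 ₽"
  else
    let cs := PySem.Int.toChars amount
    let grouped :=
      if amount < 0 then '-' :: (pvGroup3 (cs.drop 1).reverse 0).reverse
      else (pvGroup3 cs.reverse 0).reverse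
    PySem.Str.replace (String.ofList (grouped ++ " ₽".toList)) "," " "

def spending_recommendations (balance : Int) : String :=
  let recommendations : List String := []
  let recommendations := if balance ≥ 1000 then recommendations ++ ["🔧 Плановое ТО — экономия до 30%"] else recommendations
  let recommendations := if balance ≥ 500 then recommendations ++ ["🛒 Покупка запчастей — экономия до 25%"] else recommendations
  let recommendations := if balance ≥ 200 then recommendations ++ ["🧼 Мойка автомобиля — полная оплата"] else recommendations
  let recommendations := if balance ≥ 100 then recommendations ++ ["🔍 Компьютерная диагностика"] else recommendations
  let text := "💡 Лучшие способы потратить " ++ fmt_money balance ++ ":\n\n"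
  let text := text ++ PySem.Str.join "\n" (recommendations.map (fun rec => "• " ++ rec))
  text ++ "\n\n💬 Записаться на что-то из списка?"

-- ===== PORT B =====
def pvThresholds : List Int := [100, 200, 500, 1000]

def pvMessages : List String :=
  ["🔧 Плановое ТО — экономия до 30%",
   "🛒 Покупка запчастей — экономия до 25%",
   "🧼 Мойка автомобиля — полная оплата",
   "🔍 Компьютерная диагностика"]

-- Source B's while-loop binary search; lo/hi stay in 0..4 so Nat `/ 2` is Python's `// 2`
-- and `getD _ 0` is the always-in-range _THRESHOLDS[mid].
def pvBisect (balance : Int) (lo hi : Nat) : Nat :=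
  if h : lo < hi then
    let mid := (lo + hi) / 2
    if pvThresholds.getD mid 0 ≤ balance then pvBisect balance (mid + 1) hi
    else pvBisect balance lo mid
  else lo
termination_by hi - lo
decreasing_by all_goals omega

def spending_recommendations_alt (balance : Int) : String :=
  let lo := pvBisect balance 0 pvThresholds.length
  -- _MESSAGES[len(_MESSAGES) - lo:] with a nonnegative index: PySem slice, exact
  let lines := PySem.Str.join "\n"
    ((PySem.List.slice pvMessages (some ((pvMessages.length - lo : Nat) : Int)) none).map
      (fun m => "• " ++ m))
  "💡 Лучшие способы потратить " ++ fmt_money balance ++ ":\n\n" ++ lines ++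
    "\n\n💬 Записаться на что-то из списка?"

-- ===== PRECONDITION & SPEC =====
def Spec_spending_recommendations (balance : Int) (out : String) : Prop := out = spending_recommendations_alt balance
instance (balance : Int) (out : String) : Decidable (Spec_spending_recommendations balance out) := by unfold Spec_spending_recommendations; infer_instance

-- ===== CLAIM (what is proved, stated in full; the proofs are below) =====
def Claim_equal_spending_recommendations : Prop := ∀ (balance : Int), Dom_spending_recommendations balance → Spec_spending_recommendations balance (spending_recommendations balance)

-- ===== LEMMAS AND PROOFS =====
-- closed form of the binary search on the concrete 4-element table
theorem pvBisect_eq (balance : Int) :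
    pvBisect balance 0 4 =
      if 1000 ≤ balance then 4 else if 500 ≤ balance then 3
      else if 200 ≤ balance then 2 else if 100 ≤ balance then 1 else 0 := by
  by_cases h1 : (1000:Int) ≤ balance <;> by_cases h2 : (500:Int) ≤ balance <;>
    by_cases h3 : (200:Int) ≤ balance <;> by_cases h4 : (100:Int) ≤ balance <;>
      first
        | (exfalso; omega)
        | simp [pvBisect, pvThresholds, h1, h2, h3, h4]

-- ===== VERDICT (by name: the statement is the Claim_ definition above) =====
theorem spending_recommendations_spec : Claim_equal_spending_recommendations := by
  intro balance _
  unfold Spec_spending_recommendations spending_recommendations spending_recommendations_alt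
  rw [show pvThresholds.length = 4 from rfl, pvBisect_eq]
  by_cases h1 : (1000:Int) ≤ balance <;> by_cases h2 : (500:Int) ≤ balance <;>
    by_cases h3 : (200:Int) ≤ balance <;> by_cases h4 : (100:Int) ≤ balance <;>
      first
        | (exfalso; omega)
        | simp [h1, h2, h3, h4, pvMessages, PySem.List.slice_some_none, PySem.List.clampIdx,
                PySem.Str.join, String.append_assoc, ge_iff_le]
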